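-- pv_equiv track=rewrite | github.com/turvik0/algorithms_mipt | week5_6/gapped.py | pairtodeb
-- ===== SOURCE A (Python) =====
-- def pairpref(pair):
--     return (pair[0][:-1], pair[1][:-1])
--
-- def pairsuff(pair):
--     return (pair[0][1:], pair[1][1:])
--
-- def suff(string):
--     return string[1:]
--
-- def prefix(string):
--     return string[0:-1]
--
-- def pairtodeb(pairlist):
--     pairlist = list(pairlist)
--     ret = {}
--     for i in pairlist:
--         i = i.split('|')
--         suff = pairsuff(i)
--         prefix = pairpref(i)
--         if prefix in ret.keys():
--             ret[prefix].append(suff)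
--         else:
--             ret[prefix] = [suff]
--     return ret
-- ===== SOURCE B (Python) =====
-- def pairtodeb(pairlist):
--     # Two-pass group-by: materialise (prefix-pair, suffix-pair) items once,
--     # then build each bucket with a comprehension over the items, keys in
--     # first-occurrence order via dict.fromkeys.
--     items = []
--     for s in pairlist:
--         p = s.split('|')
--         items.append(((p[0][:-1], p[1][:-1]), (p[0][1:], p[1][1:])))
--     keys = dict.fromkeys(k for k, _ in items)
--     return {k: [v for k2, v in items if k2 == k] for k in keys}
-- ===== Notes on version B (the rewrite author's own statement) =====
-- stated objective: alternative
-- what changed: Replaces the incremental dict with per-element contains/append/insert by a two-pass group-by: build the (prefix,suffix) item list once, dedup the keys with dict.fromkeys, then construct each bucket by one comprehension over the items.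
import Mathlib
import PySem

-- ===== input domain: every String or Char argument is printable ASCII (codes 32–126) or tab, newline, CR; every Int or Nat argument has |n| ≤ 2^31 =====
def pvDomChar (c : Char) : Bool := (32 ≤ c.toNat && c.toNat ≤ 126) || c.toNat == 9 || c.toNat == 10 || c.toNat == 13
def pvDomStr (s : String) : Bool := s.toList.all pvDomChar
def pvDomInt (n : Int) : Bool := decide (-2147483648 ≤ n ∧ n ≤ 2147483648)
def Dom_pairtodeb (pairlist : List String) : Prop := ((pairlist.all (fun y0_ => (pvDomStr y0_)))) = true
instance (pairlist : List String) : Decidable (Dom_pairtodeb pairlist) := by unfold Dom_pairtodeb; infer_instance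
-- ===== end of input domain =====

-- B replaces A's incremental dict (contains/append/insert per element) by a two-pass group-by:
-- build the item list once, dedup the keys, then one comprehension per key; same dict value, no speed claim.

-- ===== PORT A =====
-- pair[j] via pyGet?; the none case (IndexError, a string without '|') is excluded by Pre_pairtodeb
def pvPairAt (pair : List String) (j : Int) : String := (PySem.List.pyGet? pair j).getD ""
-- helper pairpref from the Python module: (pair[0][:-1], pair[1][:-1])
def pvPairpref (pair : List String) : String × String :=
  (PySem.Str.slice (pvPairAt pair 0) none (some (-1)),
   PySem.Str.slice (pvPairAt pair 1) none (some (-1)))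
-- helper pairsuff from the Python module: (pair[0][1:], pair[1][1:])
def pvPairsuff (pair : List String) : String × String :=
  (PySem.Str.slice (pvPairAt pair 0) (some 1) none,
   PySem.Str.slice (pvPairAt pair 1) (some 1) none)

def pairtodeb (pairlist : List String) : List (String × String × List (String × String)) :=
  let ret : PySem.Dict (String × String) (List (String × String)) :=
    pairlist.foldl (fun ret i =>
      let p := (PySem.Str.split? i "|").getD []
      let sf := pvPairsuff p
      let pf := pvPairpref p
      if ret.contains pf then ret.modify pf [] (fun v => v ++ [sf]) else ret.insert pf [sf])
      PySem.Dict.empty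
  ret.items.map (fun q => (q.1.1, q.1.2, q.2))

-- ===== PORT B =====
def pairtodeb_alt (pairlist : List String) : List (String × String × List (String × String)) :=
  let items : List ((String × String) × (String × String)) :=
    pairlist.map (fun s =>
      let p := (PySem.Str.split? s "|").getD []
      let p0 := (PySem.List.pyGet? p 0).getD ""
      let p1 := (PySem.List.pyGet? p 1).getD ""
      ((PySem.Str.slice p0 none (some (-1)), PySem.Str.slice p1 none (some (-1))),
       (PySem.Str.slice p0 (some 1) none, PySem.Str.slice p1 (some 1) none)))
  let keys := PySem.List.dedup (items.map (fun it => it.1))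
  keys.map (fun k => (k.1, k.2, (items.filter (fun it => it.1 == k)).map (fun it => it.2)))

-- ===== PRECONDITION & SPEC =====
-- Pre_ excludes exactly the strings without '|': there split yields one piece and Python's pair[1] raises IndexError.
def Pre_pairtodeb (pairlist : List String) : Prop := ∀ s ∈ pairlist, PySem.Str.isIn "|" s = true
instance (pairlist : List String) : Decidable (Pre_pairtodeb pairlist) := by unfold Pre_pairtodeb; infer_instance
def pvWitness_pairtodeb : List String := ["ab|cd", "ab|ce", "x|y", "a||b"]

def Spec_pairtodeb (pairlist : List String) (out : List (String × String × List (String × String))) : Prop := out = pairtodeb_alt pairlist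
instance (pairlist : List String) (out : List (String × String × List (String × String))) : Decidable (Spec_pairtodeb pairlist out) := by unfold Spec_pairtodeb; infer_instance

-- ===== CLAIM (what is proved, stated in full; the proofs are below) =====
def Claim_equal_pairtodeb : Prop := ∀ (pairlist : List String), Dom_pairtodeb pairlist → Pre_pairtodeb pairlist → Spec_pairtodeb pairlist (pairtodeb pairlist)

-- ===== LEMMAS AND PROOFS =====

-- the shared per-string item map (prefix-pair, suffix-pair)
def pvItem (s : String) : (String × String) × (String × String) :=
  let p := (PySem.Str.split? s "|").getD []
  (pvPairpref p, pvPairsuff p)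

lemma pv_insert_eq_modify (d : PySem.Dict (String × String) (List (String × String)))
    (k : String × String) (v : String × String) (h : d.contains k = false) :
    d.insert k [v] = d.modify k [] (fun w => w ++ [v]) := by
  simp [PySem.Dict.insert, PySem.Dict.modify, h, PySem.Dict.getD_of_not_contains d [] h]

lemma pv_step_eq (d : PySem.Dict (String × String) (List (String × String)))
    (q : (String × String) × (String × String)) :
    (if d.contains q.1 then d.modify q.1 [] (fun v => v ++ [q.2]) else d.insert q.1 [q.2])
      = d.modify q.1 [] (fun v => v ++ [q.2]) := by
  by_cases h : d.contains q.1
  · simp [h]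
  · simp [eq_false_of_ne_true h, pv_insert_eq_modify d q.1 q.2 (eq_false_of_ne_true h)]

lemma pv_fold_if_eq (l : List ((String × String) × (String × String)))
    (d : PySem.Dict (String × String) (List (String × String))) :
    l.foldl (fun d q =>
        if d.contains q.1 then d.modify q.1 [] (fun v => v ++ [q.2]) else d.insert q.1 [q.2]) d
    = l.foldl (fun d q => d.modify q.1 [] (fun v => v ++ [q.2])) d := by
  induction l generalizing d with
  | nil => rfl
  | cons q l ih => rw [List.foldl_cons, List.foldl_cons, pv_step_eq, ih]

lemma pv_foldA (l : List String)
    (d : PySem.Dict (String × String) (List (String × String))) :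
    l.foldl (fun ret i => (fun d (q : (String × String) × (String × String)) =>
        if d.contains q.1 then d.modify q.1 [] (fun v => v ++ [q.2]) else d.insert q.1 [q.2])
        ret (pvItem i)) d
    = (l.map pvItem).foldl
        (fun d q => if d.contains q.1 then d.modify q.1 [] (fun v => v ++ [q.2])
          else d.insert q.1 [q.2]) d := by
  induction l generalizing d with
  | nil => rfl
  | cons i l ih => rw [List.foldl_cons, List.map_cons, List.foldl_cons, ih]

lemma pv_main (l : List ((String × String) × (String × String))) :
    (l.foldl (fun d q => d.modify q.1 [] (fun v => v ++ [q.2])) PySem.Dict.empty).items.map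
        (fun q => (q.1.1, q.1.2, q.2))
    = (PySem.List.dedup (l.map (fun it => it.1))).map
        (fun k => (k.1, k.2, (l.filter (fun it => it.1 == k)).map (fun it => it.2))) := by
  set d := l.foldl (fun d q => d.modify q.1 [] (fun v => v ++ [q.2])) PySem.Dict.empty with hd
  have hkeys : d.keys = PySem.Set.ofList (l.map (fun it => it.1)) := by
    rw [hd, PySem.Dict.keys_foldl_modify_key l (fun q => q.1) [] (fun _ q v => v ++ [q.2]),
      PySem.Dict.keys_empty, PySem.Set.update_nil_left]
  have hnd : d.keys.Nodup := by rw [hkeys]; exact PySem.Set.nodup_ofList _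
  have hgetD : ∀ k, d.getD k [] = (l.filter (fun p => p.1 == k)).map (fun p => p.2) := by
    intro k
    rw [hd, PySem.Dict.getD_foldl_modify_append l PySem.Dict.empty k, PySem.Dict.getD_empty,
      List.nil_append]
  rw [PySem.Dict.items_eq_map_keys d hnd [], hkeys, PySem.List.dedup_eq_ofList, List.map_map]
  exact List.map_congr_left (fun k _ => by simp [Function.comp, hgetD k])

theorem pairtodeb_eq_alt (pairlist : List String) :
    pairtodeb pairlist = pairtodeb_alt pairlist := by
  simp only [pairtodeb, pairtodeb_alt]
  have hA : (fun (ret : PySem.Dict (String × String) (List (String × String))) (i : String) =>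
      let p := (PySem.Str.split? i "|").getD []
      let sf := pvPairsuff p
      let pf := pvPairpref p
      if ret.contains pf then ret.modify pf [] (fun v => v ++ [sf]) else ret.insert pf [sf])
      = (fun ret i => (fun d (q : (String × String) × (String × String)) =>
          if d.contains q.1 then d.modify q.1 [] (fun v => v ++ [q.2]) else d.insert q.1 [q.2])
          ret (pvItem i)) := rfl
  have hB : (fun (s : String) =>
      let p := (PySem.Str.split? s "|").getD []
      let p0 := (PySem.List.pyGet? p 0).getD ""
      let p1 := (PySem.List.pyGet? p 1).getD ""
      ((PySem.Str.slice p0 none (some (-1)), PySem.Str.slice p1 none (some (-1))),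
       (PySem.Str.slice p0 (some 1) none, PySem.Str.slice p1 (some 1) none))) = pvItem := rfl
  rw [hA, hB, pv_foldA, pv_fold_if_eq, pv_main]
-- ===== VERDICT (by name: the statement is the Claim_ definition above) =====
theorem pairtodeb_spec : Claim_equal_pairtodeb := by
  intro pairlist _ _
  unfold Spec_pairtodeb
  exact pairtodeb_eq_alt pairlist
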